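-- pv_equiv track=rewrite | github.com/jberkow713/NewLanguage | Chess_v2.py | diag_r_down
-- ===== SOURCE A (Python) =====
-- def on_board(val, Dimensions):
--     if val[0]>=0 and val[0]<=Dimensions-1:
--         if val[1]>=0 and val[1]<=Dimensions-1:
--             return True
--     return False
--
-- def diag_r_down(piece_position, Dimensions, movable_keys, enemy_movable_keys):
--     movable_spots = []
--     drd= True
--     curr_row = piece_position[0]
--     curr_col = piece_position[1]
--     while drd == True:
--         Next = curr_row+1, curr_col+1
--         if on_board(Next, Dimensions)==False or Next in movable_keys:
--             drd = False
--             break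
--         if Next in enemy_movable_keys:
--             movable_spots.append(Next)
--             drd = False
--             break
--         movable_spots.append(Next)
--         curr_row +=1
--         curr_col +=1
--     return movable_spots
-- ===== SOURCE B (Python) =====
-- def diag_r_down(piece_position, Dimensions, movable_keys, enemy_movable_keys):
--     # Arithmetic formulation: no step-by-step walk. If the first diagonal square is
--     # off the board there are no moves; otherwise find the nearest blocker/capture
--     # offsets along the diagonal, derive the stopping offset, emit one range.
--     r, c = piece_position
--     if not (0 <= r + 1 <= Dimensions - 1 and 0 <= c + 1 <= Dimensions - 1):
--         return []
--     edge = min(Dimensions - 1 - r, Dimensions - 1 - c)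
--     blockers = [sq[0] - r for sq in movable_keys
--                 if sq[0] - r >= 1 and sq[1] - c == sq[0] - r]
--     captures = [sq[0] - r for sq in enemy_movable_keys
--                 if sq[0] - r >= 1 and sq[1] - c == sq[0] - r]
--     block = min(blockers, default=edge + 1)
--     capture = min(captures, default=edge + 1)
--     if block <= capture:
--         stop = min(block - 1, edge)
--     else:
--         stop = min(capture, edge)
--     return [(r + k, c + k) for k in range(1, stop + 1)]
-- ===== Notes on version B (the rewrite author's own statement) =====
-- stated objective: alternative
-- what changed: B replaces A's square-by-square diagonal walk by arithmetic: after checking that the first diagonal square is on the board, it computes the nearest blocker and capture offsets along the diagonal via min over offset lists, derives the stopping offset in closed form, and emits the answer as one range comprehension.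
import Mathlib
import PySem

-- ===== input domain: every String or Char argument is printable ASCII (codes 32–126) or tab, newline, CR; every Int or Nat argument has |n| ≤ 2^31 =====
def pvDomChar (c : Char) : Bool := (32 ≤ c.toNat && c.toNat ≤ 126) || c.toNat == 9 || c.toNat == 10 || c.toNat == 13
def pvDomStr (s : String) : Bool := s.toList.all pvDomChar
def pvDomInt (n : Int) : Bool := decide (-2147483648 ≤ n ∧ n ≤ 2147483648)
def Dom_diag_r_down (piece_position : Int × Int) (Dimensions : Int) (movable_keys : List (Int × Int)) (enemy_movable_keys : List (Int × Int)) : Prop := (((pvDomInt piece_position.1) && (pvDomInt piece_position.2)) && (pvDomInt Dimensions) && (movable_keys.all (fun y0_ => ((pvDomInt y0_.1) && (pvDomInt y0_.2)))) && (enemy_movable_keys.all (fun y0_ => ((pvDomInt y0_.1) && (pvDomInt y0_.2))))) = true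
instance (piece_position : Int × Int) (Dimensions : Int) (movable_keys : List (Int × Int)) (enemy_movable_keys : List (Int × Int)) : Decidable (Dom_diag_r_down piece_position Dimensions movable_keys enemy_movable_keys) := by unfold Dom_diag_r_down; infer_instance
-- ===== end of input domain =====

-- B replaces A's square-by-square walk by arithmetic: it computes the nearest blocker
-- and capture offsets along the diagonal, derives the stopping offset, and emits the
-- answer as a single range (empty when the first diagonal square is off the board).

-- ===== PORT A =====
def on_board (val : Int × Int) (Dimensions : Int) : Bool :=
  if val.1 ≥ 0 ∧ val.1 ≤ Dimensions - 1 then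
    if val.2 ≥ 0 ∧ val.2 ≤ Dimensions - 1 then true
    else false
  else false

-- used by the while-loop's termination argument
theorem on_board_row_le {val : Int × Int} {D : Int} (h : on_board val D = true) :
    val.1 ≤ D - 1 := by
  unfold on_board at h
  split at h
  · omega
  · simp at h

def diag_r_down_loop (Dimensions : Int) (movable_keys enemy_movable_keys : List (Int × Int))
    (curr_row curr_col : Int) (movable_spots : List (Int × Int)) : List (Int × Int) :=
  let Next : Int × Int := (curr_row + 1, curr_col + 1)
  if on_board Next Dimensions = false || movable_keys.contains Next then
    movable_spots
  else if enemy_movable_keys.contains Next then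
    movable_spots ++ [Next]
  else
    diag_r_down_loop Dimensions movable_keys enemy_movable_keys (curr_row + 1) (curr_col + 1)
      (movable_spots ++ [Next])
termination_by (Dimensions - 1 - curr_row).toNat
decreasing_by
  rename_i h _
  simp only [Bool.or_eq_true, decide_eq_true_eq, not_or] at h
  have hb : on_board (curr_row + 1, curr_col + 1) Dimensions = true := by
    cases hob : on_board (curr_row + 1, curr_col + 1) Dimensions
    · exact absurd hob h.1
    · rfl
  have := on_board_row_le hb
  simp only at this
  omega

def diag_r_down (piece_position : Int × Int) (Dimensions : Int) (movable_keys : List (Int × Int)) (enemy_movable_keys : List (Int × Int)) : List (Int × Int) :=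
  diag_r_down_loop Dimensions movable_keys enemy_movable_keys piece_position.1 piece_position.2 []

-- ===== PORT B =====
def diag_r_down_alt (piece_position : Int × Int) (Dimensions : Int) (movable_keys : List (Int × Int)) (enemy_movable_keys : List (Int × Int)) : List (Int × Int) :=
  let r := piece_position.1
  let c := piece_position.2
  if ¬ (0 ≤ r + 1 ∧ r + 1 ≤ Dimensions - 1 ∧ 0 ≤ c + 1 ∧ c + 1 ≤ Dimensions - 1) then []
  else
  let edge := min (Dimensions - 1 - r) (Dimensions - 1 - c)
  let blockers := (movable_keys.filter
      (fun sq => decide (sq.1 - r ≥ 1 ∧ sq.2 - c = sq.1 - r))).map (fun sq => sq.1 - r)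
  let captures := (enemy_movable_keys.filter
      (fun sq => decide (sq.1 - r ≥ 1 ∧ sq.2 - c = sq.1 - r))).map (fun sq => sq.1 - r)
  let block := match PySem.List.min? blockers (fun x => x) with
    | some m => m
    | none => edge + 1
  let capture := match PySem.List.min? captures (fun x => x) with
    | some m => m
    | none => edge + 1
  let stop := if block ≤ capture then min (block - 1) edge else min capture edge
  (PySem.List.pyRange 1 (stop + 1) 1).map (fun k => (r + k, c + k))

-- ===== PRECONDITION & SPEC =====
def Spec_diag_r_down (piece_position : Int × Int) (Dimensions : Int) (movable_keys : List (Int × Int)) (enemy_movable_keys : List (Int × Int)) (out : List (Int × Int)) : Prop := out = diag_r_down_alt piece_position Dimensions movable_keys enemy_movable_keys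
instance (piece_position : Int × Int) (Dimensions : Int) (movable_keys : List (Int × Int)) (enemy_movable_keys : List (Int × Int)) (out : List (Int × Int)) : Decidable (Spec_diag_r_down piece_position Dimensions movable_keys enemy_movable_keys out) := by unfold Spec_diag_r_down; infer_instance

-- ===== CLAIM =====
def Claim_equal_diag_r_down : Prop := ∀ (piece_position : Int × Int) (Dimensions : Int) (movable_keys : List (Int × Int)) (enemy_movable_keys : List (Int × Int)), Dom_diag_r_down piece_position Dimensions movable_keys enemy_movable_keys → Spec_diag_r_down piece_position Dimensions movable_keys enemy_movable_keys (diag_r_down piece_position Dimensions movable_keys enemy_movable_keys)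

-- ===== LEMMAS AND PROOFS =====

theorem on_board_iff (val : Int × Int) (D : Int) :
    on_board val D = true ↔ (0 ≤ val.1 ∧ val.1 ≤ D - 1 ∧ 0 ≤ val.2 ∧ val.2 ≤ D - 1) := by
  unfold on_board
  by_cases h1 : val.1 ≥ 0 ∧ val.1 ≤ D - 1 <;> by_cases h2 : val.2 ≥ 0 ∧ val.2 ≤ D - 1 <;>
    simp [h1, h2] <;> omega

-- proof-layer bridge: the first-blocker scan of a candidate list
def diag_scan (movable_keys enemy_movable_keys : List (Int × Int)) : List (Int × Int) → List (Int × Int)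
  | [] => []
  | sq :: rest =>
    if movable_keys.contains sq then []
    else if enemy_movable_keys.contains sq then [sq]
    else sq :: diag_scan movable_keys enemy_movable_keys rest

theorem scan_cons_block (mk ek : List (Int × Int)) (sq : Int × Int) (rest : List (Int × Int))
    (h1 : sq ∈ mk) : diag_scan mk ek (sq :: rest) = [] := by
  simp [diag_scan, h1]

theorem scan_cons_capture (mk ek : List (Int × Int)) (sq : Int × Int) (rest : List (Int × Int))
    (h1 : sq ∉ mk) (h2 : sq ∈ ek) : diag_scan mk ek (sq :: rest) = [sq] := by
  simp [diag_scan, h1, h2]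

theorem scan_cons_clean (mk ek : List (Int × Int)) (sq : Int × Int) (rest : List (Int × Int))
    (h1 : sq ∉ mk) (h2 : sq ∉ ek) :
    diag_scan mk ek (sq :: rest) = sq :: diag_scan mk ek rest := by
  simp [diag_scan, h1, h2]

theorem path_zero (r c : Int) {n : Int} (hn : n ≤ 0) :
    (PySem.List.pyRange 1 (n + 1) 1).map (fun k => (r + k, c + k)) = ([] : List (Int × Int)) := by
  simp only [PySem.List.pyRange_one, show (n + 1 - 1).toNat = 0 from by omega]
  simp

theorem path_succ (r c : Int) {n : Int} (hn : 1 ≤ n) :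
    (PySem.List.pyRange 1 (n + 1) 1).map (fun k => (r + k, c + k))
      = (r + 1, c + 1) :: (PySem.List.pyRange 1 n 1).map (fun k => ((r + 1) + k, (c + 1) + k)) := by
  rw [PySem.List.pyRange_one, PySem.List.pyRange_one]
  have h1 : (n + 1 - 1).toNat = (n - 1).toNat + 1 := by omega
  rw [h1, List.range_succ_eq_map]
  simp only [List.map_map, List.map_cons]
  congr 1
  apply List.map_congr_left
  intro k _
  simp only [Function.comp_apply, Prod.ext_iff, Nat.succ_eq_add_one]
  push_cast
  omega

-- A's loop from (r,c) equals the scan of the on-board candidate path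
theorem loop_eq_scan (D : Int) (mk ek : List (Int × Int)) :
    ∀ (m : Nat) (n r c : Int) (acc : List (Int × Int)),
    n.toNat = m →
    (¬ (r < -1 ∨ c < -1) → n = min (D - 1 - r) (D - 1 - c)) →
    ((r < -1 ∨ c < -1) → n ≤ 0) →
    diag_r_down_loop D mk ek r c acc
      = acc ++ diag_scan mk ek ((PySem.List.pyRange 1 (n + 1) 1).map (fun k => (r + k, c + k))) := by
  intro m
  induction m with
  | zero =>
    intro n r c acc hm h1 h2
    have hn0 : n ≤ 0 := by omega
    rw [path_zero r c hn0]
    rw [diag_r_down_loop]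
    have hob : on_board (r + 1, c + 1) D = false := by
      rw [← Bool.not_eq_true, on_board_iff]
      cases Decidable.em (r < -1 ∨ c < -1) with
      | inl h => simp only; omega
      | inr h => have hmin := h1 h; simp only; omega
    simp [hob, diag_scan]
  | succ m ih =>
    intro n r c acc hm h1 h2
    have hn1 : 1 ≤ n := by omega
    have hr : ¬ (r < -1 ∨ c < -1) := by
      intro h; have := h2 h; omega
    have hmin := h1 hr
    rw [path_succ r c hn1]
    rw [diag_r_down_loop]
    have hob : on_board (r + 1, c + 1) D = true := by
      rw [on_board_iff]; simp only; omega
    by_cases hmk : (r + 1, c + 1) ∈ mk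
    · simp [hob, hmk, diag_scan]
    · by_cases hek : (r + 1, c + 1) ∈ ek
      · simp [hob, hmk, hek, diag_scan]
      · have hrec := ih (n - 1) (r + 1) (c + 1) (acc ++ [(r + 1, c + 1)]) (by omega)
          (fun _ => by omega) (fun h => by omega)
        rw [show n - 1 + 1 = n from by omega] at hrec
        simp [hob, hmk, hek, diag_scan, hrec]

-- the scan of the full on-board path equals the arithmetic range up to the stopping offset
theorem scan_eq_range (mk ek : List (Int × Int)) :
    ∀ (m : Nat) (r c e block capture : Int), e.toNat = m → 0 ≤ e →
    1 ≤ block → 1 ≤ capture →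
    (block ≤ e → (r + block, c + block) ∈ mk) →
    (capture ≤ e → (r + capture, c + capture) ∈ ek) →
    (∀ k : Int, 1 ≤ k → (r + k, c + k) ∈ mk → block ≤ k) →
    (∀ k : Int, 1 ≤ k → (r + k, c + k) ∈ ek → capture ≤ k) →
    diag_scan mk ek ((PySem.List.pyRange 1 (e + 1) 1).map (fun k => (r + k, c + k)))
      = (PySem.List.pyRange 1
          ((if block ≤ capture then min (block - 1) e else min capture e) + 1) 1).map
          (fun k => (r + k, c + k)) := by
  intro m
  induction m with
  | zero =>
    intro r c e block capture hm he hB1 hC1 _ _ _ _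
    have he0 : e = 0 := by omega
    subst he0
    rw [path_zero r c le_rfl, path_zero]
    · exact rfl
    · split <;> omega
  | succ m ih =>
    intro r c e block capture hm he hB1 hC1 hBmem hCmem hBmin hCmin
    have he1 : 1 ≤ e := by omega
    rw [path_succ r c he1]
    by_cases hmk : (r + 1, c + 1) ∈ mk
    · -- first square is blocked: block = 1, result empty
      have hb : block = 1 := le_antisymm (hBmin 1 le_rfl (by simpa using hmk)) hB1
      rw [scan_cons_block mk ek _ _ hmk, path_zero]
      rw [hb]; split <;> omega
    · by_cases hek : (r + 1, c + 1) ∈ ek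
      · -- first square is a capture: capture = 1 < block
        have hcp : capture = 1 := le_antisymm (hCmin 1 le_rfl (by simpa using hek)) hC1
        have hbgt : ¬ block ≤ capture := by
          intro h
          have hb : block = 1 := by omega
          exact hmk (by simpa [hb] using hBmem (by omega))
        have hstop : (if block ≤ capture then min (block - 1) e else min capture e) = 1 := by
          rw [if_neg hbgt]; omega
        rw [scan_cons_capture mk ek _ _ hmk hek, hstop, path_succ r c le_rfl]
        simp
      · -- first square is clean: step one square down the diagonal
        have hb2 : 2 ≤ block := by
          by_cases hb : block = 1
          · exact absurd (by simpa [hb] using hBmem (by omega)) hmk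
          · omega
        have hc2 : 2 ≤ capture := by
          by_cases hc : capture = 1
          · exact absurd (by simpa [hc] using hCmem (by omega)) hek
          · omega
        have hstep := ih (r + 1) (c + 1) (e - 1) (block - 1) (capture - 1)
          (by omega) (by omega) (by omega) (by omega)
          (fun h => by
            have := hBmem (by omega)
            rwa [show r + block = (r + 1) + (block - 1) by ring,
                 show c + block = (c + 1) + (block - 1) by ring] at this)
          (fun h => by
            have := hCmem (by omega)
            rwa [show r + capture = (r + 1) + (capture - 1) by ring,
                 show c + capture = (c + 1) + (capture - 1) by ring] at this)
          (fun k hk hmem => by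
            have := hBmin (k + 1) (by omega) (by
              rwa [show r + (k + 1) = (r + 1) + k by ring,
                   show c + (k + 1) = (c + 1) + k by ring])
            omega)
          (fun k hk hmem => by
            have := hCmin (k + 1) (by omega) (by
              rwa [show r + (k + 1) = (r + 1) + k by ring,
                   show c + (k + 1) = (c + 1) + k by ring])
            omega)
        rw [show (PySem.List.pyRange 1 e 1) = (PySem.List.pyRange 1 ((e - 1) + 1) 1) from by
          rw [show (e - 1) + 1 = e by omega]]
        rw [scan_cons_clean mk ek _ _ hmk hek, hstep]
        have hstop : (if block ≤ capture then min (block - 1) e else min capture e)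
            = (if block - 1 ≤ capture - 1 then min (block - 1 - 1) (e - 1)
               else min (capture - 1) (e - 1)) + 1 := by
          split <;> split <;> omega
        rw [hstop, path_succ r c (by
          have : 0 ≤ (if block - 1 ≤ capture - 1 then min (block - 1 - 1) (e - 1)
              else min (capture - 1) (e - 1)) := by split <;> omega
          omega)]

-- membership in B's offset lists
theorem mem_offsets (l : List (Int × Int)) (r c k : Int) :
    k ∈ (l.filter (fun sq => decide (sq.1 - r ≥ 1 ∧ sq.2 - c = sq.1 - r))).map
          (fun sq => sq.1 - r)
      ↔ 1 ≤ k ∧ (r + k, c + k) ∈ l := by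
  simp only [List.mem_map, List.mem_filter, decide_eq_true_eq]
  constructor
  · rintro ⟨⟨a, b⟩, ⟨hmem, h1, h2⟩, rfl⟩
    refine ⟨by omega, ?_⟩
    have : (r + (a - r), c + (a - r)) = (a, b) := by
      simp only [Prod.mk.injEq] at h2 ⊢
      omega
    rwa [this]
  · rintro ⟨hk, hmem⟩
    exact ⟨(r + k, c + k), ⟨hmem, by simp; omega⟩, by simp⟩

-- ===== VERDICT =====
theorem diag_r_down_spec : Claim_equal_diag_r_down := by
  intro pp D mk ek _
  obtain ⟨r, c⟩ := pp
  unfold Spec_diag_r_down diag_r_down diag_r_down_alt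
  simp only
  by_cases hg : 0 ≤ r + 1 ∧ r + 1 ≤ D - 1 ∧ 0 ≤ c + 1 ∧ c + 1 ≤ D - 1
  case neg =>
    rw [if_pos hg]
    rw [diag_r_down_loop]
    have hob : on_board (r + 1, c + 1) D = false := by
      rw [← Bool.not_eq_true, on_board_iff]
      simp only
      exact fun h => hg ⟨h.1, h.2.1, h.2.2.1, h.2.2.2⟩
    simp [hob]
  rw [if_neg (not_not_intro hg)]
  obtain ⟨h1, h2, h3, h4⟩ := hg
  have he : 0 ≤ min (D - 1 - r) (D - 1 - c) := by omega
  rw [loop_eq_scan D mk ek (min (D - 1 - r) (D - 1 - c)).toNat (min (D - 1 - r) (D - 1 - c))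
    r c [] rfl (fun _ => rfl) (fun h => by omega)]
  rw [List.nil_append]
  generalize hE : min (D - 1 - r) (D - 1 - c) = E at he ⊢
  cases hB : PySem.List.min? ((mk.filter
      (fun sq => decide (sq.1 - r ≥ 1 ∧ sq.2 - c = sq.1 - r))).map (fun sq => sq.1 - r))
      (fun x => x) with
  | none =>
    have hBe : (mk.filter (fun sq => decide (sq.1 - r ≥ 1 ∧ sq.2 - c = sq.1 - r))).map
        (fun sq => sq.1 - r) = [] := (PySem.List.min?_eq_none_iff _ _).mp hB
    cases hC : PySem.List.min? ((ek.filter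
        (fun sq => decide (sq.1 - r ≥ 1 ∧ sq.2 - c = sq.1 - r))).map (fun sq => sq.1 - r))
        (fun x => x) with
    | none =>
      have hCe : (ek.filter (fun sq => decide (sq.1 - r ≥ 1 ∧ sq.2 - c = sq.1 - r))).map
          (fun sq => sq.1 - r) = [] := (PySem.List.min?_eq_none_iff _ _).mp hC
      exact scan_eq_range mk ek _ r c _ _ _ rfl he
        (show (1:Int) ≤ E + 1 by omega) (show (1:Int) ≤ E + 1 by omega)
        (fun h => absurd h (show ¬ (E + 1 ≤ E) by omega))
        (fun h => absurd h (show ¬ (E + 1 ≤ E) by omega))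
        (fun k hk hm => by
          have : k ∈ ([] : List Int) := hBe ▸ (mem_offsets mk r c k).mpr ⟨hk, hm⟩
          simp at this)
        (fun k hk hm => by
          have : k ∈ ([] : List Int) := hCe ▸ (mem_offsets ek r c k).mpr ⟨hk, hm⟩
          simp at this)
    | some mc =>
      have hmemc := (mem_offsets ek r c mc).mp (PySem.List.min?_mem hC)
      exact scan_eq_range mk ek _ r c _ _ _ rfl he
        (show (1:Int) ≤ E + 1 by omega) hmemc.1
        (fun h => absurd h (show ¬ (E + 1 ≤ E) by omega)) (fun _ => hmemc.2)
        (fun k hk hm => by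
          have : k ∈ ([] : List Int) := hBe ▸ (mem_offsets mk r c k).mpr ⟨hk, hm⟩
          simp at this)
        (fun k hk hm =>
          PySem.List.min?_isMin hC k ((mem_offsets ek r c k).mpr ⟨hk, hm⟩))
  | some mb =>
    have hmemb := (mem_offsets mk r c mb).mp (PySem.List.min?_mem hB)
    cases hC : PySem.List.min? ((ek.filter
        (fun sq => decide (sq.1 - r ≥ 1 ∧ sq.2 - c = sq.1 - r))).map (fun sq => sq.1 - r))
        (fun x => x) with
    | none =>
      have hCe : (ek.filter (fun sq => decide (sq.1 - r ≥ 1 ∧ sq.2 - c = sq.1 - r))).map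
          (fun sq => sq.1 - r) = [] := (PySem.List.min?_eq_none_iff _ _).mp hC
      exact scan_eq_range mk ek _ r c _ _ _ rfl he hmemb.1
        (show (1:Int) ≤ E + 1 by omega)
        (fun _ => hmemb.2) (fun h => absurd h (show ¬ (E + 1 ≤ E) by omega))
        (fun k hk hm =>
          PySem.List.min?_isMin hB k ((mem_offsets mk r c k).mpr ⟨hk, hm⟩))
        (fun k hk hm => by
          have : k ∈ ([] : List Int) := hCe ▸ (mem_offsets ek r c k).mpr ⟨hk, hm⟩
          simp at this)
    | some mc =>
      have hmemc := (mem_offsets ek r c mc).mp (PySem.List.min?_mem hC)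
      exact scan_eq_range mk ek _ r c _ _ _ rfl he hmemb.1 hmemc.1
        (fun _ => hmemb.2) (fun _ => hmemc.2)
        (fun k hk hm =>
          PySem.List.min?_isMin hB k ((mem_offsets mk r c k).mpr ⟨hk, hm⟩))
        (fun k hk hm =>
          PySem.List.min?_isMin hC k ((mem_offsets ek r c k).mpr ⟨hk, hm⟩))
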